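-- pv_equiv track=rewrite | github.com/domysh/BoolExpression | verityTable.py | symTable
-- ===== SOURCE A (Python) =====
-- def symTable(expr):
--     sym = []
--     for i in expr:
--         if i.isalnum() and i not in sym:
--             sym.append(i)
--     sym.sort()
--     sym = tuple(sym)
--     return sym
-- ===== SOURCE B (Python) =====
-- def symTable(expr):
--     chars = sorted(c for c in expr if c.isalnum())
--     sym = []
--     for c in chars:
--         if not sym or c != sym[-1]:
--             sym.append(c)
--     return tuple(sym)
-- ===== Notes on version B (the rewrite author's own statement) =====
-- stated objective: alternative
-- what changed: A deduplicates during the scan by membership-testing each alnum char in the growing list (quadratic) and sorts at the end; B collects all alnum chars, sorts them once, and deduplicates in a single pass by comparing each char with the last kept one.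
import Mathlib
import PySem

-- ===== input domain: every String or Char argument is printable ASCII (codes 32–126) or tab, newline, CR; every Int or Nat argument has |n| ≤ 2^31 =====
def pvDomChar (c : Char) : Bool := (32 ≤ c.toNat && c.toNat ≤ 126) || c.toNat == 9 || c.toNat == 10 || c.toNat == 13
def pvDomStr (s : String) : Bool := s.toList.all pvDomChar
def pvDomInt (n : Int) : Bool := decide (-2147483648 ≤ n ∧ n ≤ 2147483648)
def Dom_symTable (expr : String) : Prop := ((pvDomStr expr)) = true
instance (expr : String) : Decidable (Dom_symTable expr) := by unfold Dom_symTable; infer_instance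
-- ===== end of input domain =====

-- B sorts all alphanumeric characters once and deduplicates adjacent equals in one pass,
-- instead of A's membership-test-in-growing-list dedup followed by a sort (alternative algorithm).
-- Both ports carry the characters and wrap each as a one-character string at the end
-- ('for i in expr' yields one-character strings): exact, since equality and Python's sort
-- order on one-character strings coincide with those on the characters.

-- ===== PORT A =====
def symTable (expr : String) : List String :=
  let sym := expr.toList.foldl (fun sym c =>
    if PySem.Chars.isalnum c && !(sym.contains c) then sym ++ [c] else sym) []
  (PySem.List.sorted sym (fun x => x) false).map (fun c => String.ofList [c])

-- ===== PORT B =====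
def symTable_alt (expr : String) : List String :=
  let chars := PySem.List.sorted (expr.toList.filter (fun c => PySem.Chars.isalnum c)) (fun x => x) false
  -- 'if not sym or c != sym[-1]' = the last element of sym (if any) is not c
  let sym := chars.foldl (fun sym c =>
    if sym.getLast? ≠ some c then sym ++ [c] else sym) []
  sym.map (fun c => String.ofList [c])

-- ===== PRECONDITION & SPEC =====
def Spec_symTable (expr : String) (out : List String) : Prop := out = symTable_alt expr
instance (expr : String) (out : List String) : Decidable (Spec_symTable expr out) := by unfold Spec_symTable; infer_instance

-- ===== CLAIM (what is proved, stated in full; the proofs are below) =====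
def Claim_equal_symTable : Prop := ∀ (expr : String), Dom_symTable expr → Spec_symTable expr (symTable expr)

-- ===== LEMMAS AND PROOFS =====

-- structural form of B's adjacent-dedup loop: 'adjD o l' keeps the chars of l skipping
-- those equal to the previously kept one (o = the last kept char so far)
def adjD : Option Char → List Char → List Char
  | _, [] => []
  | o, c :: cs => if o = some c then adjD o cs else c :: adjD (some c) cs

theorem foldl_adjD (l : List Char) (acc : List Char) :
    l.foldl (fun sym c => if sym.getLast? ≠ some c then sym ++ [c] else sym) acc
    = acc ++ adjD acc.getLast? l := by
  induction l generalizing acc with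
  | nil => simp [adjD]
  | cons c cs ih =>
    simp only [List.foldl_cons]
    by_cases hc : acc.getLast? = some c
    · rw [if_neg (by simp [hc]), ih]
      rw [show adjD acc.getLast? (c :: cs) = adjD acc.getLast? cs from by
        simp only [adjD]; rw [if_pos hc]]
    · rw [if_pos hc, ih, List.getLast?_concat]
      rw [show adjD acc.getLast? (c :: cs) = c :: adjD (some c) cs from by
        simp only [adjD]; rw [if_neg hc]]
      simp

theorem mem_of_mem_adjD {x : Char} : ∀ (o : Option Char) (l : List Char), x ∈ adjD o l → x ∈ l := by
  intro o l
  induction l generalizing o with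
  | nil => simp [adjD]
  | cons c cs ih =>
    simp only [adjD]
    split
    · intro h; exact List.mem_cons_of_mem _ (ih _ h)
    · intro h
      rcases List.mem_cons.mp h with h | h
      · exact h ▸ List.mem_cons_self
      · exact List.mem_cons_of_mem _ (ih _ h)

theorem mem_adjD_of_mem {x : Char} : ∀ (o : Option Char) (l : List Char),
    x ∈ l → o ≠ some x → x ∈ adjD o l := by
  intro o l
  induction l generalizing o with
  | nil => simp
  | cons c cs ih =>
    intro hx ho
    simp only [adjD]
    split
    · rename_i he
      have hxc : x ≠ c := fun hh => ho (hh ▸ he ▸ rfl)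
      rcases List.mem_cons.mp hx with h | h
      · exact absurd h hxc
      · exact ih _ h ho
    · rcases List.mem_cons.mp hx with h | h
      · exact h ▸ List.mem_cons_self
      · by_cases hxc : x = c
        · exact hxc ▸ List.mem_cons_self
        · exact List.mem_cons_of_mem _ (ih _ h (fun hh => hxc (Option.some.inj hh).symm))

theorem adjD_lt_of_le : ∀ (l : List Char) (a : Char), l.Pairwise (· ≤ ·) →
    (∀ x ∈ l, a ≤ x) → ∀ x ∈ adjD (some a) l, a < x := by
  intro l
  induction l with
  | nil => simp [adjD]
  | cons e es ih =>
    intro a hp hb x hx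
    rcases List.pairwise_cons.mp hp with ⟨he, hpes⟩
    by_cases hae : (some a : Option Char) = some e
    · rw [show adjD (some a) (e :: es) = adjD (some a) es from by
        simp only [adjD]; rw [if_pos hae]] at hx
      have hae' : a = e := Option.some.inj hae
      exact ih a hpes (fun y hy => by rw [hae']; exact he y hy) x hx
    · rw [show adjD (some a) (e :: es) = e :: adjD (some e) es from by
        simp only [adjD]; rw [if_neg hae]] at hx
      have hane : a ≠ e := fun hh => hae (hh ▸ rfl)
      have hle : a ≤ e := hb e List.mem_cons_self
      rcases List.mem_cons.mp hx with h | h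
      · exact h ▸ lt_of_le_of_ne hle hane
      · exact lt_of_le_of_lt hle (ih e hpes he x h)

theorem adjD_pairwise_lt : ∀ (l : List Char) (o : Option Char), l.Pairwise (· ≤ ·) →
    (adjD o l).Pairwise (· < ·) := by
  intro l
  induction l with
  | nil => intro o _; simp [adjD]
  | cons e es ih =>
    intro o hp
    rcases List.pairwise_cons.mp hp with ⟨he, hpes⟩
    simp only [adjD]
    split
    · exact ih o hpes
    · exact List.pairwise_cons.mpr ⟨adjD_lt_of_le es e hpes he, ih (some e) hpes⟩

theorem foldA_spec : ∀ (l : List Char) (acc : List Char), acc.Nodup →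
    (l.foldl (fun sym c =>
        if PySem.Chars.isalnum c && !(sym.contains c) then sym ++ [c] else sym) acc).Nodup ∧
    (∀ x, x ∈ l.foldl (fun sym c =>
        if PySem.Chars.isalnum c && !(sym.contains c) then sym ++ [c] else sym) acc ↔
      x ∈ acc ∨ (x ∈ l ∧ PySem.Chars.isalnum x = true)) := by
  intro l
  induction l with
  | nil => intro acc hacc; simpa using hacc
  | cons c cs ih =>
    intro acc hacc
    simp only [List.foldl_cons]
    by_cases hg : (PySem.Chars.isalnum c && !(acc.contains c)) = true
    · rw [if_pos hg]
      simp only [Bool.and_eq_true, Bool.not_eq_true', List.contains_eq_mem,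
        decide_eq_false_iff_not] at hg
      obtain ⟨halc, hc⟩ := hg
      obtain ⟨hn, hm⟩ := ih (acc ++ [c])
        (by
          refine hacc.append (List.nodup_singleton c) ?_
          intro a ha hac
          rw [List.mem_singleton] at hac
          exact hc (hac ▸ ha))
      refine ⟨hn, fun x => ?_⟩
      rw [hm x]
      simp only [List.mem_append, List.mem_cons, List.not_mem_nil, or_false]
      constructor
      · rintro ((h | rfl) | ⟨h1, h2⟩)
        · exact Or.inl h
        · exact Or.inr ⟨Or.inl rfl, halc⟩
        · exact Or.inr ⟨Or.inr h1, h2⟩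
      · rintro (h | ⟨(rfl | h1), h2⟩)
        · exact Or.inl (Or.inl h)
        · exact Or.inl (Or.inr rfl)
        · exact Or.inr ⟨h1, h2⟩
    · rw [if_neg hg]
      obtain ⟨hn, hm⟩ := ih acc hacc
      refine ⟨hn, fun x => ?_⟩
      rw [hm x]
      simp only [Bool.and_eq_true, Bool.not_eq_true', List.contains_eq_mem,
        decide_eq_false_iff_not, not_and, not_not] at hg
      constructor
      · rintro (h | ⟨h1, h2⟩)
        · exact Or.inl h
        · exact Or.inr ⟨List.mem_cons_of_mem _ h1, h2⟩
      · rintro (h | ⟨h1, h2⟩)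
        · exact Or.inl h
        · rcases List.mem_cons.mp h1 with rfl | h1
          · exact Or.inl (hg h2)
          · exact Or.inr ⟨h1, h2⟩

-- ===== VERDICT (by name: the statement is the Claim_ definition above) =====
theorem symTable_spec : Claim_equal_symTable := by
  intro expr _
  unfold Spec_symTable symTable symTable_alt
  simp only []
  congr 1
  -- reduce to equality of the underlying char lists
  rw [foldl_adjD]
  simp only [List.nil_append, List.getLast?_nil]
  set S := expr.toList.filter (fun c => PySem.Chars.isalnum c) with hS
  set sortedS := PySem.List.sorted S (fun x => x) false with hsS
  set B := adjD none sortedS with hB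
  set A := expr.toList.foldl (fun sym c =>
      if PySem.Chars.isalnum c && !(sym.contains c) then sym ++ [c] else sym) [] with hA
  obtain ⟨hAnodup, hAmem⟩ := foldA_spec expr.toList [] List.nodup_nil
  rw [← hA] at hAnodup hAmem
  have hpairS : sortedS.Pairwise (· ≤ ·) := by
    have := PySem.List.sorted_pairwise S (fun x => x)
    simpa [← hsS] using this
  have hBlt : B.Pairwise (· < ·) := adjD_pairwise_lt sortedS none hpairS
  have hBnodup : B.Nodup := hBlt.imp (fun h => ne_of_lt h)
  have hBmem : ∀ x, x ∈ B ↔ x ∈ S := by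
    intro x
    constructor
    · intro h
      have := mem_of_mem_adjD none sortedS h
      rw [hsS, PySem.List.mem_sorted] at this
      exact this
    · intro h
      exact mem_adjD_of_mem none sortedS
        (by rw [hsS, PySem.List.mem_sorted]; exact h) (by simp)
  have hperm : B.Perm A := by
    rw [List.perm_ext_iff_of_nodup hBnodup hAnodup]
    intro x
    rw [hBmem x]
    have hx := hAmem x
    simp only [List.not_mem_nil, false_or] at hx
    rw [hS, List.mem_filter, hx]
  exact PySem.List.sorted_eq_of_perm_of_pairwise_lt A B (fun x => x) hperm (by simpa using hBlt)
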